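-- pv_equiv track=rewrite | github.com/kiper220-alt/gpupdate | gpoa/gpt/systemds.py | _expand_windows_var
-- ===== SOURCE A (Python) =====
-- def _expand_windows_var(path):
--     if not path:
--         return path
--     variables = {
--         'HOME': '/etc/skel',
--         'HOMEPATH': '/etc/skel',
--         'HOMEDRIVE': '/',
--         'SystemRoot': '/',
--         'SystemDrive': '/',
--         'USERNAME': '',
--     }
--     result = str(path)
--     for key, value in variables.items():
--         replacement = str(value)
--         if key not in ('USERNAME',) and not replacement.endswith('/'):
--             replacement = '{}{}'.format(replacement, '/')
--         result = result.replace('%{}%'.format(key), replacement)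
--     return result
-- ===== SOURCE B (Python) =====
-- def _expand_windows_var(path):
--     # One split on '%' and a merge pass per variable, instead of six full-string replace passes.
--     if not path:
--         return path
--     variables = {
--         'HOME': '/etc/skel/',
--         'HOMEPATH': '/etc/skel/',
--         'HOMEDRIVE': '/',
--         'SystemRoot': '/',
--         'SystemDrive': '/',
--         'USERNAME': '',
--     }
--     parts = str(path).split('%')
--     for key, value in variables.items():
--         # merge every '... % KEY % next' into '...<value>next', scanning left to right
--         merged = []
--         buf = [parts[0]]
--         i = 1
--         while i < len(parts):
--             if parts[i] == key and i + 1 < len(parts):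
--                 buf.append(value)
--                 buf.append(parts[i + 1])
--                 i += 2
--             else:
--                 merged.append(''.join(buf))
--                 buf = [parts[i]]
--                 i += 1
--         merged.append(''.join(buf))
--         parts = merged
--     return '%'.join(parts)
-- ===== Notes on version B (the rewrite author's own statement) =====
-- stated objective: alternative
-- what changed: B splits the path once on the percent separator and, for each variable in order, merges key-runs between adjacent separators into their precomputed replacement strings in one left-to-right list pass before rejoining, instead of A's six sequential full-string str.replace passes that recompute the trailing-slash rule each time.
import Mathlib
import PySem

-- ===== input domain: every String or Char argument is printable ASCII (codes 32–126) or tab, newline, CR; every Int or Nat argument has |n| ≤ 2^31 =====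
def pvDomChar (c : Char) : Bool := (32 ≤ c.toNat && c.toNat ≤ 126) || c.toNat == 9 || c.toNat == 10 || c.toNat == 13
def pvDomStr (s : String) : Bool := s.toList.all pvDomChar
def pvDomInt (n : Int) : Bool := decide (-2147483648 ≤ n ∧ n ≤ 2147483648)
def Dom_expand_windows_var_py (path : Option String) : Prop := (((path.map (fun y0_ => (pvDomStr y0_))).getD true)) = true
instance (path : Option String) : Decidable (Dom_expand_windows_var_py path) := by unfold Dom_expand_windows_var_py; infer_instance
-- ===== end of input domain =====

-- B replaces A's six sequential str.replace passes by one split on '%' plus a per-variable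
-- merge pass with precomputed replacements; return values proved equal on all inputs.

-- ===== PORT A =====
def expand_windows_var_py (path : Option String) : Option String :=
  match path with
  | none => none                         -- `if not path: return path`
  | some s =>
    if s = "" then some s else           -- `if not path: return path`
    let vars_ : PySem.Dict String String := PySem.Dict.ofList
      [("HOME", "/etc/skel"), ("HOMEPATH", "/etc/skel"), ("HOMEDRIVE", "/"),
       ("SystemRoot", "/"), ("SystemDrive", "/"), ("USERNAME", "")]
    let result := s                      -- `result = str(path)`
    some (vars_.items.foldl (fun result kv =>
      let key := kv.1
      let replacement := kv.2            -- `replacement = str(value)`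
      let replacement :=
        if !(["USERNAME"].contains key) && !(PySem.Str.endswith replacement "/")
        then replacement ++ "/" else replacement
      PySem.Str.replace result ("%" ++ key ++ "%") replacement) result)

-- ===== PORT B =====
-- the inner while loop of Source B: `buf` holds the fragments of the part being merged
def pvMerge (key value : List Char) : List (List Char) → List (List Char) → List (List Char)
  | buf, [] => [buf.flatten]
  | buf, [p] => [buf.flatten, p]
  | buf, p :: q :: rs =>
    if p = key then pvMerge key value (buf ++ [value, q]) rs
    else buf.flatten :: pvMerge key value [p] (q :: rs)

def expand_windows_var_py_alt (path : Option String) : Option String :=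
  match path with
  | none => none
  | some s =>
    if s = "" then some s else
    let vars_ : List (List Char × List Char) :=
      [("HOME".toList, "/etc/skel/".toList), ("HOMEPATH".toList, "/etc/skel/".toList),
       ("HOMEDRIVE".toList, "/".toList), ("SystemRoot".toList, "/".toList),
       ("SystemDrive".toList, "/".toList), ("USERNAME".toList, "".toList)]
    let parts := PySem.Chars.splitOn s.toList ['%']
    let parts := vars_.foldl (fun ps kv =>
      match ps with
      | [] => []                          -- unreachable: split never returns []
      | p :: rest => pvMerge kv.1 kv.2 [p] rest) parts
    some (String.ofList (PySem.Chars.join ['%'] parts))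

-- ===== PRECONDITION & SPEC =====
def Spec_expand_windows_var_py (path : Option String) (out : Option String) : Prop := out = expand_windows_var_py_alt path
instance (path : Option String) (out : Option String) : Decidable (Spec_expand_windows_var_py path out) := by unfold Spec_expand_windows_var_py; infer_instance

-- ===== CLAIM (what is proved, stated in full; the proofs are below) =====
def Claim_equal_expand_windows_var_py : Prop := ∀ (path : Option String), Dom_expand_windows_var_py path → Spec_expand_windows_var_py path (expand_windows_var_py path)

-- ===== LEMMAS AND PROOFS =====

-- fuel-free rendering of PySem.Chars.replace (for old ≠ [])
def pvRep (old new : List Char) : List Char → List Char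
  | [] => []
  | c :: t =>
    if h : old.isPrefixOf (c :: t) = true ∧ old ≠ []
    then new ++ pvRep old new (List.drop old.length (c :: t))
    else c :: pvRep old new t
termination_by l => l.length
decreasing_by
  · have : 1 ≤ old.length := List.length_pos_iff.mpr h.2
    simp [List.length_drop]; omega
  · simp

theorem pvRep_go (old new : List Char) (hold : old ≠ []) :
    ∀ (fuel : Nat) (l acc : List Char), l.length ≤ fuel →
      PySem.Chars.replace.go old new fuel l acc = acc.reverse ++ pvRep old new l := by
  intro fuel
  induction fuel with
  | zero =>
    intro l acc hl
    have : l = [] := List.eq_nil_of_length_eq_zero (Nat.le_zero.mp hl)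
    subst this; rw [PySem.Chars.replace.go]; simp [pvRep]
  | succ n ih =>
    intro l acc hl
    match l with
    | [] =>
      rw [PySem.Chars.replace.go]
      · simp [pvRep]
      · omega
    | c :: t =>
      rw [PySem.Chars.replace.go]
      by_cases hp : old.isPrefixOf (c :: t) = true
      · simp only [hp, if_true]
        have h1 : 1 ≤ old.length := List.length_pos_iff.mpr hold
        have hlen : (List.drop old.length (c :: t)).length ≤ n := by
          simp [List.length_drop]; simp at hl; omega
        rw [ih _ _ hlen]
        rw [pvRep]; simp [hp, hold]
      · simp only [hp]
        have hlen : t.length ≤ n := by simp at hl; omega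
        rw [ih _ _ hlen]
        rw [pvRep]; simp [hp]

theorem pvRep_replace (old new s : List Char) (hold : old ≠ []) :
    PySem.Chars.replace s old new = pvRep old new s := by
  rw [PySem.Chars.replace]
  have hE : old.isEmpty = false := by
    cases old with
    | nil => exact absurd rfl hold
    | cons o os => rfl
  simp only [hE, Bool.false_eq_true, if_false]
  simpa using pvRep_go old new hold s.length s []

-- fuel-free rendering of PySem.Chars.splitOn · ['%']
def pvSplit : List Char → List (List Char)
  | [] => [[]]
  | c :: t => if c = '%' then [] :: pvSplit t
              else match pvSplit t with
                   | [] => [[c]]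
                   | p :: ps => (c :: p) :: ps

theorem pvSplit_ne_nil (l : List Char) : pvSplit l ≠ [] := by
  match l with
  | [] => simp [pvSplit]
  | c :: t =>
    rw [pvSplit]
    split
    · simp
    · split <;> simp

theorem pvSplit_go : ∀ (fuel : Nat) (l cur : List Char) (racc : List (List Char)),
    l.length < fuel →
      PySem.Chars.splitOn.go ['%'] fuel l cur racc =
        racc.reverse ++ match pvSplit l with
                        | [] => [cur.reverse]
                        | p :: ps => (cur.reverse ++ p) :: ps := by
  intro fuel
  induction fuel with
  | zero => intro l cur racc h; omega
  | succ n ih =>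
    intro l cur racc h
    match l with
    | [] =>
      rw [PySem.Chars.splitOn.go]
      · simp [pvSplit]
      · omega
    | c :: t =>
      rw [PySem.Chars.splitOn.go]
      by_cases hc : c = '%'
      · have hp : List.isPrefixOf ['%'] (c :: t) = true := by simp [hc, List.isPrefixOf]
        simp only [hp, if_true]
        have hlen : t.length < n := by simp at h; omega
        rw [ih _ _ _ (by simpa using hlen)]
        rw [pvSplit]
        simp only [hc, if_true]
        cases hps : pvSplit t with
        | nil => exact absurd hps (pvSplit_ne_nil t)
        | cons p ps => simp [hps]
      · have hp : List.isPrefixOf ['%'] (c :: t) = false := by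
          simp [List.isPrefixOf]; exact fun h => absurd h.symm hc
        simp only [hp, Bool.false_eq_true, if_false]
        have hlen : t.length < n := by simp at h; omega
        rw [ih _ _ _ hlen]
        rw [pvSplit]
        simp only [hc, if_false]
        cases hps : pvSplit t with
        | nil => exact absurd hps (pvSplit_ne_nil t)
        | cons p ps => simp

theorem pvSplit_splitOn (l : List Char) :
    PySem.Chars.splitOn l ['%'] = pvSplit l := by
  rw [PySem.Chars.splitOn]
  rw [pvSplit_go (l.length + 1) l [] [] (by omega)]
  cases hps : pvSplit l with
  | nil => exact absurd hps (pvSplit_ne_nil l)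
  | cons p ps => simp

-- the flattened tail of a '%'-joined part list
def pvF (parts : List (List Char)) : List Char := (parts.map (fun q => '%' :: q)).flatten

-- '%'.join rendered without intercalate
def pvJoin : List (List Char) → List Char
  | [] => []
  | p :: rest => p ++ pvF rest

theorem pvJoin_eq_join (parts : List (List Char)) :
    PySem.Chars.join ['%'] parts = pvJoin parts := by
  rw [PySem.Chars.join]
  induction parts with
  | nil => simp [pvJoin, List.intercalate]
  | cons p rest ih =>
    cases rest with
    | nil => simp [pvJoin, pvF, List.intercalate, List.intersperse]
    | cons q rs =>
      have h2 : List.intercalate ['%'] (p :: q :: rs) = p ++ ['%'] ++ List.intercalate ['%'] (q :: rs) := by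
        simp [List.intercalate, List.intersperse]
      rw [h2, ih]
      simp [pvJoin, pvF]

theorem pvSplit_join (l : List Char) : pvJoin (pvSplit l) = l := by
  induction l with
  | nil => simp [pvSplit, pvJoin, pvF]
  | cons c t ih =>
    rw [pvSplit]
    by_cases hc : c = '%'
    · simp only [hc, if_true]
      cases hps : pvSplit t with
      | nil => exact absurd hps (pvSplit_ne_nil t)
      | cons p ps =>
        rw [hps] at ih
        simp [pvJoin, pvF] at *
        simpa [hc] using ih
    · simp only [hc, if_false]
      cases hps : pvSplit t with
      | nil => exact absurd hps (pvSplit_ne_nil t)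
      | cons p ps =>
        rw [hps] at ih
        simp [pvJoin, pvF] at *
        simpa [hc] using ih

theorem pvSplit_free (l : List Char) : ∀ p ∈ pvSplit l, '%' ∉ p := by
  induction l with
  | nil => simp [pvSplit]
  | cons c t ih =>
    rw [pvSplit]
    by_cases hc : c = '%'
    · simp only [hc, if_true]
      intro p hp
      rcases List.mem_cons.mp hp with h | h
      · simp [h]
      · exact ih p h
    · simp only [hc, if_false]
      cases hps : pvSplit t with
      | nil => exact absurd hps (pvSplit_ne_nil t)
      | cons p ps =>
        rw [hps] at ih
        intro r hr
        rcases List.mem_cons.mp hr with h | h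
        · subst h
          intro hmem
          rcases List.mem_cons.mp hmem with h | h
          · exact hc h.symm
          · exact ih p (by simp) h
        · exact ih r (by simp [h])


def pvG (k v : List Char) : List (List Char) → List Char
  | [] => []
  | [p] => '%' :: p
  | p :: q :: rs => if p = k then v ++ q ++ pvG k v rs else '%' :: p ++ pvG k v (q :: rs)

-- two-step induction matching the merge pass
theorem pvParts_ind (motive : List (List Char) → Prop) (h1 : motive [])
    (h2 : ∀ p, motive [p])
    (h3 : ∀ p q rs, motive rs → motive (q :: rs) → motive (p :: q :: rs)) :
    ∀ l, motive l
  | [] => h1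
  | [p] => h2 p
  | p :: q :: rs => h3 p q rs (pvParts_ind motive h1 h2 h3 rs) (pvParts_ind motive h1 h2 h3 (q :: rs))
termination_by l => l.length

theorem pvMerge_ne_nil (k v : List Char) (buf : List (List Char)) (parts : List (List Char)) :
    pvMerge k v buf parts ≠ [] := by
  fun_induction pvMerge <;> simp_all

theorem pvF_cons (a : List Char) (l : List (List Char)) :
    pvF (a :: l) = '%' :: pvJoin (a :: l) := by
  simp [pvF, pvJoin]

theorem pvMerge_join (k v : List Char) (parts : List (List Char)) :
    ∀ (buf : List (List Char)),
      pvJoin (pvMerge k v buf parts) = buf.flatten ++ pvG k v parts := by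
  induction parts using pvParts_ind with
  | h1 => intro buf; simp [pvMerge, pvJoin, pvG, pvF]
  | h2 p => intro buf; simp [pvMerge, pvJoin, pvG, pvF]
  | h3 p q rs ih1 ih2 =>
    intro buf
    rw [pvMerge, pvG]
    by_cases hpk : p = k
    · simp only [hpk, if_true]
      rw [ih1]
      simp
    · simp only [hpk, if_false]
      have hne := pvMerge_ne_nil k v [p] (q :: rs)
      cases hm : pvMerge k v [p] (q :: rs) with
      | nil => exact absurd hm hne
      | cons m ms =>
        rw [pvJoin, pvF_cons, ← hm, ih2]
        simp

-- walking through a '%'-free chunk never matches a pattern that starts with '%'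
theorem pvRep_walk (pt v : List Char) :
    ∀ (cs rest : List Char), '%' ∉ cs →
      pvRep ('%' :: pt) v (cs ++ rest) = cs ++ pvRep ('%' :: pt) v rest := by
  intro cs
  induction cs with
  | nil => simp
  | cons c cs' ih =>
    intro rest hfree
    have hc : c ≠ '%' := fun h => hfree (by simp [h])
    rw [List.cons_append, pvRep]
    have hnp : ¬ (List.isPrefixOf ('%' :: pt) (c :: (cs' ++ rest)) = true ∧ ('%' :: pt) ≠ []) := by
      intro ⟨h1, _⟩
      rw [List.isPrefixOf_iff_prefix, List.cons_prefix_cons] at h1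
      exact hc h1.1.symm
    rw [dif_neg hnp]
    rw [ih rest (fun h => hfree (by simp [h]))]
    simp

-- '(a ++ ['%']) is a prefix of (b ++ '%' :: t)' forces a = b when a, b are '%'-free
theorem pvPrefix_iff : ∀ (a b t : List Char), '%' ∉ a → '%' ∉ b →
    ((a ++ ['%']) <+: (b ++ '%' :: t) ↔ a = b) := by
  intro a
  induction a with
  | nil =>
    intro b t _ hb
    cases b with
    | nil => simp
    | cons y b' =>
      have hy : y ≠ '%' := fun h => hb (by simp [h])
      simp only [List.nil_append, List.cons_append, List.cons_prefix_cons]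
      constructor
      · intro h; exact absurd h.1.symm hy
      · intro h; simp at h
  | cons x a' ih =>
    intro b t ha hb
    cases b with
    | nil =>
      have hx : x ≠ '%' := fun h => ha (by simp [h])
      simp only [List.cons_append, List.nil_append, List.cons_prefix_cons]
      constructor
      · intro h; exact absurd h.1 hx
      · intro h; simp at h
    | cons y b' =>
      have hxa : '%' ∉ a' := fun h => ha (by simp [h])
      have hyb : '%' ∉ b' := fun h => hb (by simp [h])
      simp only [List.cons_append, List.cons_prefix_cons]
      rw [ih b' t hxa hyb]
      constructor
      · intro h; simp [h.1, h.2]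
      · intro h; simp at h; exact ⟨h.1, h.2⟩

-- a pattern '%k%' cannot hide inside a '%'-free part with nothing after it
theorem pvPrefix_nil (a b : List Char) (hb : '%' ∉ b) :
    ¬ ((a ++ ['%']) <+: b) := by
  intro h
  exact hb (List.IsPrefix.mem (by simp) h)

-- core: the replace pass equals the merge pass on the flattened tail
theorem pvRep_pvG (k v : List Char) (hk : '%' ∉ k)
    (parts : List (List Char)) : (∀ p ∈ parts, '%' ∉ p) →
      pvRep ('%' :: (k ++ ['%'])) v (pvF parts) = pvG k v parts := by
  induction parts using pvParts_ind with
  | h1 => intro _; simp [pvF, pvG, pvRep]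
  | h2 p =>
    intro hfree
    have hp : '%' ∉ p := hfree p (by simp)
    simp only [pvF, List.map_cons, List.map_nil, List.flatten_cons, List.flatten_nil,
      List.append_nil]
    rw [pvRep]
    have hnp : ¬ (List.isPrefixOf ('%' :: (k ++ ['%'])) ('%' :: p) = true ∧ ('%' :: (k ++ ['%'])) ≠ []) := by
      intro ⟨h1, _⟩
      rw [List.isPrefixOf_iff_prefix, List.cons_prefix_cons] at h1
      exact pvPrefix_nil k p hp h1.2
    rw [dif_neg hnp]
    have hw := pvRep_walk (k ++ ['%']) v p [] hp
    simp only [List.append_nil] at hw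
    simp [pvG, hw, pvRep]
  | h3 p q rs ih1 ih2 =>
    intro hfree
    have hp : '%' ∉ p := hfree p (by simp)
    have hq : '%' ∉ q := hfree q (by simp)
    have hfrees : ∀ r ∈ rs, '%' ∉ r := fun r hr => hfree r (List.mem_cons_of_mem _ (List.mem_cons_of_mem _ hr))
    have hfreeqs : ∀ r ∈ q :: rs, '%' ∉ r := by
      intro r hr
      rcases List.mem_cons.mp hr with h | h
      · subst h; exact hq
      · exact hfrees r h
    simp only [pvF, List.map_cons, List.flatten_cons, List.cons_append]
    rw [pvRep, pvG]
    by_cases hpk : p = k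
    · subst hpk
      have hp1 : ('%' :: (p ++ ['%'])).isPrefixOf
          ('%' :: (p ++ ('%' :: (q ++ (rs.map (fun q => '%' :: q)).flatten)))) = true := by
        rw [List.isPrefixOf_iff_prefix, List.cons_prefix_cons]
        refine ⟨rfl, ?_⟩
        rw [show p ++ ('%' :: (q ++ (rs.map (fun q => '%' :: q)).flatten))
              = (p ++ ['%']) ++ (q ++ (rs.map (fun q => '%' :: q)).flatten) by simp]
        exact List.prefix_append _ _
      rw [dif_pos ⟨hp1, by simp⟩]
      have hdrop : List.drop ('%' :: (p ++ ['%'])).length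
          ('%' :: (p ++ ('%' :: (q ++ (rs.map (fun q => '%' :: q)).flatten))))
          = q ++ (rs.map (fun q => '%' :: q)).flatten := by
        simp only [List.length_cons, List.drop_succ_cons]
        rw [show p ++ ('%' :: (q ++ (rs.map (fun q => '%' :: q)).flatten))
              = (p ++ ['%']) ++ (q ++ (rs.map (fun q => '%' :: q)).flatten) by simp]
        rw [List.drop_left]
      rw [hdrop]
      rw [pvRep_walk (p ++ ['%']) v q _ hq]
      have h1 := ih1 hfrees
      simp only [pvF] at h1
      rw [h1]
      simp
    · have hnp : ¬ (List.isPrefixOf ('%' :: (k ++ ['%']))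
          ('%' :: (p ++ ('%' :: (q ++ (rs.map (fun q => '%' :: q)).flatten)))) = true ∧
          ('%' :: (k ++ ['%'])) ≠ []) := by
        intro ⟨h1, _⟩
        rw [List.isPrefixOf_iff_prefix, List.cons_prefix_cons] at h1
        have h2 := h1.2
        rw [show p ++ ('%' :: (q ++ (rs.map (fun q => '%' :: q)).flatten))
              = p ++ '%' :: (q ++ (rs.map (fun q => '%' :: q)).flatten) by simp] at h2
        exact hpk ((pvPrefix_iff k p _ hk hp).mp h2).symm
      rw [dif_neg hnp]
      rw [pvRep_walk (k ++ ['%']) v p _ hp]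
      have := ih2 hfreeqs
      simp only [pvF, List.map_cons, List.flatten_cons, List.cons_append] at this
      rw [this]
      simp [hpk]

-- parts stay '%'-free through a merge pass
theorem pvMerge_free (k v : List Char) (hv : '%' ∉ v) (parts : List (List Char)) :
    ∀ (buf : List (List Char)), (∀ p ∈ parts, '%' ∉ p) → (∀ p ∈ buf, '%' ∉ p) →
      ∀ r ∈ pvMerge k v buf parts, '%' ∉ r := by
  induction parts using pvParts_ind with
  | h1 =>
    intro buf _ hbuf
    simp only [pvMerge]
    intro r hr
    simp only [List.mem_singleton] at hr
    subst hr
    intro hmem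
    rcases List.mem_flatten.mp hmem with ⟨l, hl, hcl⟩
    exact hbuf l hl hcl
  | h2 p =>
    intro buf hparts hbuf
    simp only [pvMerge]
    intro r hr
    rcases List.mem_cons.mp hr with h | h
    · subst h
      intro hmem
      rcases List.mem_flatten.mp hmem with ⟨l, hl, hcl⟩
      exact hbuf l hl hcl
    · simp only [List.mem_singleton] at h; simpa [h] using hparts p (by simp)
  | h3 p q rs ih1 ih2 =>
    intro buf hparts hbuf
    rw [pvMerge]
    by_cases hpk : p = k
    · simp only [hpk, if_true]
      apply ih1
      · intro r hr; exact hparts r (List.mem_cons_of_mem _ (List.mem_cons_of_mem _ hr))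
      · intro r hr
        rcases List.mem_append.mp hr with h | h
        · exact hbuf r h
        · rcases List.mem_cons.mp h with h | h
          · subst h; exact hv
          · simp only [List.mem_singleton] at h; simpa [h] using hparts q (by simp)
    · simp only [hpk, if_false]
      intro r hr
      rcases List.mem_cons.mp hr with h | h
      · subst h
        intro hmem
        rcases List.mem_flatten.mp hmem with ⟨l, hl, hcl⟩
        exact hbuf l hl hcl
      · refine ih2 [p] (fun x hx => hparts x (List.mem_cons_of_mem _ hx))
          (fun x hx => by simp only [List.mem_singleton] at hx; simpa [hx] using hparts p (by simp)) r h

-- one replace pass on the joined string = one merge pass on the parts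
theorem pvStep (k v : List Char) (hk : '%' ∉ k)
    (p : List Char) (rest : List (List Char))
    (hfree : ∀ r ∈ p :: rest, '%' ∉ r) :
    PySem.Chars.replace (pvJoin (p :: rest)) ('%' :: (k ++ ['%'])) v
      = pvJoin (pvMerge k v [p] rest) := by
  rw [pvRep_replace _ _ _ (by simp)]
  rw [pvJoin]
  rw [pvRep_walk (k ++ ['%']) v p _ (hfree p (by simp))]
  rw [pvRep_pvG k v hk rest (fun r hr => hfree r (List.mem_cons_of_mem _ hr))]
  rw [pvMerge_join]
  simp

-- the whole fold: replace passes over the join = merge passes over the parts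
theorem pvFold (kvs : List (List Char × List Char))
    (hkvs : ∀ kv ∈ kvs, '%' ∉ kv.1 ∧ '%' ∉ kv.2) :
    ∀ (p : List Char) (rest : List (List Char)), (∀ r ∈ p :: rest, '%' ∉ r) →
      kvs.foldl (fun r kv => PySem.Chars.replace r ('%' :: (kv.1 ++ ['%'])) kv.2) (pvJoin (p :: rest))
        = pvJoin (kvs.foldl (fun ps kv =>
            match ps with
            | [] => []
            | p :: rest => pvMerge kv.1 kv.2 [p] rest) (p :: rest)) := by
  induction kvs with
  | nil => intro p rest _; simp
  | cons kv kvs ih =>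
    intro p rest hfree
    obtain ⟨hk, hv⟩ := hkvs kv (by simp)
    simp only [List.foldl_cons]
    rw [pvStep kv.1 kv.2 hk p rest hfree]
    have hfree' := pvMerge_free kv.1 kv.2 hv rest [p]
      (fun r hr => hfree r (List.mem_cons_of_mem _ hr))
      (fun r hr => by simp only [List.mem_singleton] at hr; simpa [hr] using hfree p (by simp))
    cases hm : pvMerge kv.1 kv.2 [p] rest with
    | nil => exact absurd hm (pvMerge_ne_nil _ _ _ _)
    | cons m ms =>
      rw [hm] at hfree'
      rw [ih (fun x hx => hkvs x (List.mem_cons_of_mem _ hx)) m ms hfree']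

-- A's per-key replacement adjustment, applied once (for relating the two folds)
def pvAdj (kv : String × String) : List Char × List Char :=
  (kv.1.toList,
   (if !(["USERNAME"].contains kv.1) && !(PySem.Str.endswith kv.2 "/")
    then kv.2 ++ "/" else kv.2).toList)

-- A's String-level fold, pushed down to the character level
theorem pvHfold (L : List (String × String)) :
    ∀ (r : String),
      (L.foldl (fun result kv =>
        let key := kv.1
        let replacement := kv.2
        let replacement :=
          if !(["USERNAME"].contains key) && !(PySem.Str.endswith replacement "/")
          then replacement ++ "/" else replacement
        PySem.Str.replace result ("%" ++ key ++ "%") replacement) r).toList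
      = (L.map pvAdj).foldl
          (fun r kv => PySem.Chars.replace r ('%' :: (kv.1 ++ ['%'])) kv.2) r.toList := by
  induction L with
  | nil => intro r; simp
  | cons kv L ih =>
    intro r
    simp only [List.foldl_cons, List.map_cons]
    rw [ih]
    have hpat : ("%" ++ kv.1 ++ "%").toList = '%' :: (kv.1.toList ++ ['%']) := by
      simp [show "%".toList = ['%'] from rfl]
    have hx : (PySem.Str.replace r ("%" ++ kv.1 ++ "%")
        (if !(["USERNAME"].contains kv.1) && !(PySem.Str.endswith kv.2 "/")
         then kv.2 ++ "/" else kv.2)).toList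
        = PySem.Chars.replace r.toList ('%' :: ((pvAdj kv).1 ++ ['%'])) (pvAdj kv).2 := by
      rw [PySem.Str.replace, String.toList_ofList, hpat]
      rfl
    exact congrArg
      (fun x => List.foldl (fun r kv => PySem.Chars.replace r ('%' :: (kv.1 ++ ['%'])) kv.2)
        x (L.map pvAdj)) hx

-- ===== VERDICT (by name: the statement is the Claim_ definition above) =====
theorem expand_windows_var_py_spec : Claim_equal_expand_windows_var_py := by
  intro path _
  unfold Spec_expand_windows_var_py
  match path with
  | none => rfl
  | some s =>
    by_cases hs : s = ""
    · simp [expand_windows_var_py, expand_windows_var_py_alt, hs]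
    · rw [expand_windows_var_py, expand_windows_var_py_alt]
      simp only [if_neg hs]
      have hitems : (PySem.Dict.ofList
          [("HOME", "/etc/skel"), ("HOMEPATH", "/etc/skel"), ("HOMEDRIVE", "/"),
           ("SystemRoot", "/"), ("SystemDrive", "/"), ("USERNAME", "")]).items
          = [("HOME", "/etc/skel"), ("HOMEPATH", "/etc/skel"), ("HOMEDRIVE", "/"),
             ("SystemRoot", "/"), ("SystemDrive", "/"), ("USERNAME", "")] := by decide
      rw [hitems]
      obtain ⟨p, rest, hps⟩ : ∃ p rest, pvSplit s.toList = p :: rest := by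
        cases h : pvSplit s.toList with
        | nil => exact absurd h (pvSplit_ne_nil _)
        | cons a b => exact ⟨a, b, rfl⟩
      have hfree := pvSplit_free s.toList
      rw [hps] at hfree
      have hmap : ([("HOME", "/etc/skel"), ("HOMEPATH", "/etc/skel"), ("HOMEDRIVE", "/"),
             ("SystemRoot", "/"), ("SystemDrive", "/"), ("USERNAME", "")].map pvAdj)
          = [("HOME".toList, "/etc/skel/".toList), ("HOMEPATH".toList, "/etc/skel/".toList),
             ("HOMEDRIVE".toList, "/".toList), ("SystemRoot".toList, "/".toList),
             ("SystemDrive".toList, "/".toList), ("USERNAME".toList, "".toList)] := by decide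
      have hMain : (List.foldl (fun result kv =>
            let key := kv.1
            let replacement := kv.2
            let replacement :=
              if !(["USERNAME"].contains key) && !(PySem.Str.endswith replacement "/")
              then replacement ++ "/" else replacement
            PySem.Str.replace result ("%" ++ key ++ "%") replacement) s
            [("HOME", "/etc/skel"), ("HOMEPATH", "/etc/skel"), ("HOMEDRIVE", "/"),
             ("SystemRoot", "/"), ("SystemDrive", "/"), ("USERNAME", "")]).toList
          = PySem.Chars.join ['%'] (List.foldl (fun ps kv =>
              match ps with
              | [] => []
              | p :: rest => pvMerge kv.1 kv.2 [p] rest)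
              (PySem.Chars.splitOn s.toList ['%'])
              [("HOME".toList, "/etc/skel/".toList), ("HOMEPATH".toList, "/etc/skel/".toList),
               ("HOMEDRIVE".toList, "/".toList), ("SystemRoot".toList, "/".toList),
               ("SystemDrive".toList, "/".toList), ("USERNAME".toList, "".toList)]) := by
        rw [pvHfold, hmap]
        rw [pvSplit_splitOn, hps, pvJoin_eq_join]
        rw [show s.toList = pvJoin (p :: rest) by rw [← hps, pvSplit_join]]
        exact pvFold _ (by decide) p rest hfree
      have h2 := congrArg String.ofList hMain
      rw [String.ofList_toList] at h2
      exact congrArg some h2
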